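-- pv_equiv track=rewrite | github.com/paiml/depyler | examples/hard_dict_merge_deep.py | merge_prefer_left
-- ===== SOURCE A (Python) =====
-- def merge_prefer_left(a: dict[str, int], b: dict[str, int], all_keys: list[str]) -> dict[str, int]:
--     result: dict[str, int] = {}
--     i: int = 0
--     while i < len(all_keys):
--         ak: str = all_keys[i]
--         if ak in a:
--             result[ak] = a[ak]
--         elif ak in b:
--             result[ak] = b[ak]
--         i = i + 1
--     return result
-- ===== SOURCE B (Python) =====
-- def merge_prefer_left(a: dict[str, int], b: dict[str, int], all_keys: list[str]) -> dict[str, int]: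
--     merged = {**b, **a}
--     return {k: merged[k] for k in all_keys if k in merged}
-- ===== Notes on version B (the rewrite author's own statement) =====
-- stated objective: simpler
-- what changed: Replaces the index-driven while loop with per-key if/elif precedence by building a single merged lookup dict ({**b, **a}) once and then one comprehension over all_keys.
import Mathlib
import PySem

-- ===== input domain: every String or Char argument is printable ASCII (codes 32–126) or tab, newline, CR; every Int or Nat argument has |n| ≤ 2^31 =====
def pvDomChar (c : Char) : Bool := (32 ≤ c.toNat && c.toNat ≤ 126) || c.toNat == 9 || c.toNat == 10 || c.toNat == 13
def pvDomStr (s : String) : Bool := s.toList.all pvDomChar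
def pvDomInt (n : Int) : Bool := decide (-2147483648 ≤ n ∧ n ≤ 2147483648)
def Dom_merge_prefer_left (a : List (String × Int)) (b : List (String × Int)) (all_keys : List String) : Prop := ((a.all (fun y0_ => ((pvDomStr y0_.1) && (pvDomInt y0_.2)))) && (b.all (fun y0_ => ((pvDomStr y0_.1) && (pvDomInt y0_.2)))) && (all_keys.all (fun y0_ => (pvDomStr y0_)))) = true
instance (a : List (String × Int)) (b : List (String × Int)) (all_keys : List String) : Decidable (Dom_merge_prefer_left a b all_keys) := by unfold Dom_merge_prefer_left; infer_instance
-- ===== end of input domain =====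

-- B builds one merged lookup dict ({**b, **a}) and then a single comprehension over all_keys,
-- replacing A's index-driven while loop with per-key if/elif precedence (objective: simpler).


-- ===== PORT A =====
-- while i < len(all_keys): ak = all_keys[i]; if ak in a: result[ak]=a[ak] elif ak in b: result[ak]=b[ak]; i += 1
-- the sequential index loop is ported as the fold over all_keys in order
def merge_prefer_left (a : List (String × Int)) (b : List (String × Int)) (all_keys : List String) : List (String × Int) :=
  (all_keys.foldl (fun result ak =>
    match (PySem.Dict.mk a).get? ak with
    | some v => result.insert ak v
    | none =>
      match (PySem.Dict.mk b).get? ak with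
      | some v => result.insert ak v
      | none => result) PySem.Dict.empty).items

-- ===== PORT B =====
-- merged = {**b, **a}; return {k: merged[k] for k in all_keys if k in merged}
def merge_prefer_left_alt (a : List (String × Int)) (b : List (String × Int)) (all_keys : List String) : List (String × Int) :=
  let merged := a.foldl (fun d p => d.insert p.1 p.2) (PySem.Dict.mk b)
  (all_keys.foldl (fun r k =>
    match merged.get? k with
    | some v => r.insert k v
    | none => r) PySem.Dict.empty).items

-- ===== PRECONDITION & SPEC =====
-- Pre_ requires a's keys to be distinct: a stands for a Python dict, which cannot hold duplicate
-- keys; on duplicate-key association lists (not reachable from Python) first-match and {**b, **a}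
-- last-match semantics differ.
def Pre_merge_prefer_left (a : List (String × Int)) (b : List (String × Int)) (all_keys : List String) : Prop :=
  (a.map Prod.fst).Nodup
instance (a : List (String × Int)) (b : List (String × Int)) (all_keys : List String) : Decidable (Pre_merge_prefer_left a b all_keys) := by unfold Pre_merge_prefer_left; infer_instance
def pvWitness_merge_prefer_left : (List (String × Int)) × (List (String × Int)) × List String :=
  ([("x", 1), ("y", 5)], [("y", 2), ("z", 3)], ["x", "z", "y", "w"])

def Spec_merge_prefer_left (a : List (String × Int)) (b : List (String × Int)) (all_keys : List String) (out : List (String × Int)) : Prop := out = merge_prefer_left_alt a b all_keys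
instance (a : List (String × Int)) (b : List (String × Int)) (all_keys : List String) (out : List (String × Int)) : Decidable (Spec_merge_prefer_left a b all_keys out) := by unfold Spec_merge_prefer_left; infer_instance

-- ===== CLAIM (what is proved, stated in full; the proofs are below) =====
def Claim_equal_merge_prefer_left : Prop := ∀ (a : List (String × Int)) (b : List (String × Int)) (all_keys : List String), Dom_merge_prefer_left a b all_keys → Pre_merge_prefer_left a b all_keys → Spec_merge_prefer_left a b all_keys (merge_prefer_left a b all_keys)

-- ===== LEMMAS AND PROOFS =====

-- lookup in the merged dict {**b, **a} (a's keys distinct) = first try a, then b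
theorem get?_merged (a : List (String × Int)) (d : PySem.Dict String Int)
    (h : (a.map Prod.fst).Nodup) (k : String) :
    (a.foldl (fun d p => d.insert p.1 p.2) d).get? k
      = ((PySem.Dict.mk a).get? k).or (d.get? k) := by
  induction a generalizing d with
  | nil => simp [PySem.Dict.get?]
  | cons p rest ih =>
    obtain ⟨k0, v0⟩ := p
    simp only [List.map_cons, List.nodup_cons] at h
    simp only [List.foldl_cons, ih _ h.2, PySem.Dict.get?_mk_cons]
    by_cases hk : k0 = k
    · subst hk
      have hnone : (PySem.Dict.mk rest).get? k0 = none := by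
        rw [PySem.Dict.get?_eq_none_iff_not_mem_keys]
        simpa [PySem.Dict.keys, PySem.Dict.items] using h.1
      simp [hnone, PySem.Dict.get?_insert_self]
    · rw [PySem.Dict.get?_insert_of_ne d v0 (Ne.symm hk)]
      simp [beq_iff_eq, hk]

theorem merge_prefer_left_spec : Claim_equal_merge_prefer_left := by
  intro a b all_keys _ hpre
  unfold Spec_merge_prefer_left merge_prefer_left merge_prefer_left_alt
  have hstep :
      (fun (result : PySem.Dict String Int) ak =>
        match (PySem.Dict.mk a).get? ak with
        | some v => result.insert ak v
        | none =>
          match (PySem.Dict.mk b).get? ak with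
          | some v => result.insert ak v
          | none => result)
      = (fun (r : PySem.Dict String Int) k =>
        match (a.foldl (fun d p => d.insert p.1 p.2) (PySem.Dict.mk b)).get? k with
        | some v => r.insert k v
        | none => r) := by
    funext r k
    rw [get?_merged a (PySem.Dict.mk b) hpre k]
    cases ha : (PySem.Dict.mk a).get? k <;>
      cases hb : (PySem.Dict.mk b).get? k <;> simp [Option.or]
  rw [hstep]
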